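-- pv_equiv track=rewrite | github.com/MellB92/medexam-ai | scripts/batch_correct_with_reasoning.py | _escape_unescaped_quotes
-- ===== SOURCE A (Python) =====
-- def _escape_unescaped_quotes(s: str) -> str:
--     out = []
--     for i, ch in enumerate(s):
--         if ch != '"':
--             out.append(ch)
--             continue
--         # Count backslashes directly before i
--         bs = 0
--         j = i - 1
--         while j >= 0 and s[j] == "\\":
--             bs += 1
--             j -= 1
--         if bs % 2 == 0:
--             out.append('\\"')
--         else:
--             out.append('"')
--     return "".join(out)
-- ===== SOURCE B (Python) =====
-- def _escape_unescaped_quotes(s: str) -> str: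
--     # Split on '"'; each quote sits between consecutive parts. The backslash run
--     # immediately before a quote lies entirely inside the preceding original part
--     # (that part's other boundary is a quote or the start of s), so its parity is
--     # the parity of the part's trailing backslashes.
--     parts = s.split('"')
--     res = [parts[0]]
--     for prev, part in zip(parts, parts[1:]):
--         bs = len(prev) - len(prev.rstrip("\\"))
--         res.append('"' if bs % 2 else '\\"')
--         res.append(part)
--     return "".join(res)
-- ===== Notes on version B (the rewrite author's own statement) =====
-- stated objective: faster
-- what changed: Instead of re-scanning backwards at every quote to count preceding backslashes, B splits the string on the quote character once and decides each quote's escaping from the parity of the preceding part's trailing backslashes (via rstrip), then joins the parts back.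
import Mathlib
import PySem

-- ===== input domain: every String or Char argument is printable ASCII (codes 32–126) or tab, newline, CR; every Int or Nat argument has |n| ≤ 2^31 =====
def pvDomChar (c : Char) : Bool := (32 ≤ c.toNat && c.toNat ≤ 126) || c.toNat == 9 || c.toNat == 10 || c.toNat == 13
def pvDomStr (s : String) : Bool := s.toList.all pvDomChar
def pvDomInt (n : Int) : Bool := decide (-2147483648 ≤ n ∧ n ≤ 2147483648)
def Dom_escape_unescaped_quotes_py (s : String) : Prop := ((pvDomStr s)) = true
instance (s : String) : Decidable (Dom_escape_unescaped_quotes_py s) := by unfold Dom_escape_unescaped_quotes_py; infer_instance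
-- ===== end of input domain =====

-- B replaces A's per-quote backward re-scan by splitting on '"' and reading the parity of
-- the preceding part's trailing backslashes (objective: faster; measured constant-factor).

-- ===== PORT A =====
-- the inner `while j >= 0 and s[j] == "\\"` loop of A, counting backslashes before a quote
def pvBsCount (l : List Char) (j : Int) : Nat :=
  if h : 0 ≤ j ∧ PySem.List.pyGet? l j = some '\\' then
    pvBsCount l (j - 1) + 1
  else 0
termination_by (j + 1).toNat
decreasing_by
  have := h.1
  omega

-- one iteration of A's `for i, ch in enumerate(s)` body
def pvAStep (l : List Char) (out : List Char) (p : Int × Char) : List Char :=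
  if p.2 ≠ '"' then out ++ [p.2]
  else if pvBsCount l (p.1 - 1) % 2 = 0 then out ++ ['\\', '"']
  else out ++ ['"']

def escape_unescaped_quotes_py (s : String) : String :=
  String.ofList ((PySem.List.enumerate s.toList 0).foldl (pvAStep s.toList) [])

-- ===== PORT B =====
-- p.rstrip("\\") of Source B
def pvRstripBs (p : List Char) : List Char := (p.reverse.dropWhile (· = '\\')).reverse

-- one iteration of Source B's `for prev, part in zip(parts, parts[1:])` body
def pvBStep (res : List (List Char)) (pr : List Char × List Char) : List (List Char) :=
  let bs := pr.1.length - (pvRstripBs pr.1).length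
  res ++ [if bs % 2 ≠ 0 then ['"'] else ['\\', '"'], pr.2]

def escape_unescaped_quotes_py_alt (s : String) : String :=
  let parts := s.toList.splitOn '"'
  let res := (parts.zip (parts.drop 1)).foldl pvBStep [parts.headD []]
  String.ofList res.flatten

-- ===== PRECONDITION & SPEC =====
def Spec_escape_unescaped_quotes_py (s : String) (out : String) : Prop := out = escape_unescaped_quotes_py_alt s
instance (s : String) (out : String) : Decidable (Spec_escape_unescaped_quotes_py s out) := by unfold Spec_escape_unescaped_quotes_py; infer_instance

-- ===== CLAIM (what is proved, stated in full; the proofs are below) =====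
def Claim_equal_escape_unescaped_quotes_py : Prop := ∀ (s : String), Dom_escape_unescaped_quotes_py s → Spec_escape_unescaped_quotes_py s (escape_unescaped_quotes_py s)

-- ===== LEMMAS AND PROOFS =====

-- number of trailing backslashes of a processed prefix
def pvTb (p : List Char) : Nat := (p.reverse.takeWhile (· = '\\')).length

theorem pvTb_append (p : List Char) (c : Char) :
    pvTb (p ++ [c]) = if c = '\\' then pvTb p + 1 else 0 := by
  simp [pvTb, List.takeWhile]
  by_cases h : c = '\\' <;> simp [h]

-- canonical single-pass scan both ports are reduced to: state = (out, running bs count)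
def pvCStep (acc : List Char × Nat) (ch : Char) : List Char × Nat :=
  if ch = '\\' then (acc.1 ++ [ch], acc.2 + 1)
  else if ch = '"' then
    (acc.1 ++ (if acc.2 % 2 ≠ 0 then ['"'] else ['\\', '"']), 0)
  else (acc.1 ++ [ch], 0)

-- A's backward scan at position i computes the trailing-backslash count of the prefix
theorem pvBsCount_eq_tb (l : List Char) : ∀ i : Nat, i ≤ l.length →
    pvBsCount l ((i : Int) - 1) = pvTb (l.take i) := by
  intro i
  induction i with
  | zero =>
      intro _
      rw [pvBsCount]
      simp [pvTb]
  | succ n ih =>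
      intro hle
      have hn : n < l.length := by omega
      have htake : l.take (n + 1) = l.take n ++ [l[n]] := by
        have := @List.take_concat_get _ l n hn
        simpa [List.concat_eq_append] using this.symm
      have hcast : ((n + 1 : Nat) : Int) - 1 = (n : Int) := by push_cast; ring
      rw [hcast, pvBsCount]
      by_cases hc : l[n] = '\\'
      · have hcond : 0 ≤ (n : Int) ∧ PySem.List.pyGet? l (n : Int) = some '\\' := by
          refine ⟨by positivity, ?_⟩
          simp [PySem.List.pyGet?_natCast, List.getElem?_eq_getElem hn, hc]
        rw [dif_pos hcond, htake, pvTb_append, if_pos hc, ih (by omega)]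
      · have hcond : ¬ (0 ≤ (n : Int) ∧ PySem.List.pyGet? l (n : Int) = some '\\') := by
          intro h
          apply hc
          have := h.2
          simpa [PySem.List.pyGet?_natCast, List.getElem?_eq_getElem hn] using this
        rw [dif_neg hcond, htake, pvTb_append, if_neg hc]

-- A's fold over the enumerated suffix from index n = canonical scan with counter pvTb (l.take n)
theorem pvA_eq_scan (l : List Char) : ∀ (t : List Char) (n : Nat) (out : List Char),
    l.drop n = t → n ≤ l.length →
    (PySem.List.enumerate t (n : Int)).foldl (pvAStep l) out
      = (t.foldl pvCStep (out, pvTb (l.take n))).1 := by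
  intro t
  induction t with
  | nil => intro n out _ _; simp [PySem.List.enumerate_nil]
  | cons c t' ih =>
      intro n out hdrop hle
      have hget : l[n]? = some c := by
        have : (l.drop n)[0]? = some c := by rw [hdrop]; rfl
        simpa using this
      have hn : n < l.length := by
        rcases List.getElem?_eq_some_iff.mp hget with ⟨h, _⟩
        exact h
      have hc : l[n] = c := by
        have := List.getElem?_eq_getElem hn
        rw [this] at hget
        exact Option.some.inj hget
      have hdrop' : l.drop (n + 1) = t' := by
        have : (l.drop n).drop 1 = t' := by rw [hdrop]; rfl
        simpa [List.drop_drop, Nat.add_comm] using this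
      have htake : l.take (n + 1) = l.take n ++ [c] := by
        simp [List.take_succ, hn, hc]
      rw [PySem.List.enumerate_cons]
      simp only [List.foldl_cons]
      have hcast : ((n : Int) + 1) = ((n + 1 : Nat) : Int) := by push_cast; ring
      rw [hcast, ih (n + 1) _ hdrop' (by omega)]
      congr 1
      rw [htake, pvTb_append]
      by_cases hbs : c = '\\'
      · simp [pvAStep, pvCStep, hbs]
      · by_cases hq : c = '"'
        · have hcnt := pvBsCount_eq_tb l n (by omega)
          simp only [pvAStep, pvCStep, hq]
          simp only [ne_eq, not_true_eq_false, if_false]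
          rw [hcnt]
          by_cases hpar : pvTb (l.take n) % 2 = 0 <;> simp [hpar]
        · simp [pvAStep, pvCStep, hbs, hq]

-- Source B's bs (length minus rstrip length) is the trailing-backslash count
theorem pvRstrip_len (p : List Char) : p.length - (pvRstripBs p).length = pvTb p := by
  have h := List.takeWhile_append_dropWhile (p := (· = '\\')) (l := p.reverse)
  have h2 := congrArg List.length h
  simp only [List.length_append, List.length_reverse] at h2
  simp [pvRstripBs, pvTb]
  omega

-- scanning a quote-free segment from a fresh counter appends it and ends with its trailing run
theorem pvScan_noquote : ∀ (p : List Char), '"' ∉ p → ∀ out,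
    p.foldl pvCStep (out, 0) = (out ++ p, pvTb p) := by
  intro p
  induction p using List.reverseRecOn with
  | nil => intro _ out; simp [pvTb]
  | append_singleton p c ih =>
      intro hmem out
      have hp : '"' ∉ p := fun h => hmem (List.mem_append_left _ h)
      have hc : c ≠ '"' := by
        intro h
        exact hmem (by simp [h])
      rw [List.foldl_append, ih hp out]
      simp only [List.foldl_cons, List.foldl_nil, pvTb_append]
      by_cases hbs : c = '\\'
      · simp [pvCStep, hbs]
      · simp [pvCStep, hbs, hc]

-- the escaped replacement a quote receives, given the part before it
def pvEsc (p : List Char) : List Char :=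
  if (p.length - (pvRstripBs p).length) % 2 ≠ 0 then ['"'] else ['\\', '"']

-- what Source B's loop contributes after the first part
def pvTailE : List Char → List (List Char) → List Char
  | _, [] => []
  | p, q :: rest => pvEsc p ++ q ++ pvTailE q rest

theorem pvFold_zip : ∀ (rest : List (List Char)) (p : List Char) (acc : List (List Char)),
    (((p :: rest).zip rest).foldl pvBStep acc).flatten = acc.flatten ++ pvTailE p rest := by
  intro rest
  induction rest with
  | nil => intro p acc; simp [pvTailE]
  | cons q rest ih =>
      intro p acc
      simp only [List.zip_cons_cons, List.foldl_cons]
      rw [ih q]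
      simp [pvBStep, pvTailE, pvEsc]

-- the canonical scan equals Source B's split-based construction
theorem pvScan_eq_split : ∀ (N : Nat) (l : List Char), l.length ≤ N → ∀ out,
    (l.foldl pvCStep (out, 0)).1
      = out ++ (l.splitOn '"').headD [] ++ pvTailE ((l.splitOn '"').headD []) ((l.splitOn '"').drop 1) := by
  intro N
  induction N with
  | zero =>
      intro l hl out
      have : l = [] := List.length_eq_zero_iff.mp (by omega)
      subst this
      simp [List.splitOn, pvTailE]
  | succ N ih =>
      intro l hl out
      by_cases hq : '"' ∈ l
      · -- l = p ++ '"' :: t with p quote-free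
        obtain ⟨p, t, hpt, hp⟩ : ∃ p t, l = p ++ '"' :: t ∧ '"' ∉ p := by
          clear ih hl
          induction l with
          | nil => simp at hq
          | cons c l ihl =>
              by_cases hc : c = '"'
              · exact ⟨[], l, by simp [hc], by simp⟩
              · have hm : '"' ∈ l := by
                  rcases List.mem_cons.mp hq with h | h
                  · exact absurd h.symm hc
                  · exact h
                obtain ⟨p, t, h1, h2⟩ := ihl hm
                exact ⟨c :: p, t, by simp [h1], by
                  simp only [List.mem_cons, not_or]
                  exact ⟨fun h => hc h.symm, h2⟩⟩
        subst hpt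
        have hsplit : (p ++ '"' :: t).splitOn '"' = p :: t.splitOn '"' := by
          apply List.splitOnP_first
          · intro x hx
            simp only [beq_iff_eq]
            intro h
            exact hp (h ▸ hx)
          · simp
        have ht : t.length ≤ N := by
          have := hl
          simp [List.length_append] at this
          omega
        rw [List.foldl_append, pvScan_noquote p hp out]
        simp only [List.foldl_cons]
        have hstep : pvCStep (out ++ p, pvTb p) '"' = (out ++ p ++ pvEsc p, 0) := by
          have hne : ('"' : Char) ≠ '\\' := by decide
          simp [pvCStep, pvEsc, pvRstrip_len, hne]
        rw [hstep, ih t ht]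
        obtain ⟨q, rest, hqr⟩ := List.exists_cons_of_ne_nil (List.splitOnP_ne_nil (· == '"') t)
        have hqr2 : t.splitOn '"' = q :: rest := hqr
        rw [hsplit, hqr2]
        simp [pvTailE]
      · have hsplit : l.splitOn '"' = [l] :=
          List.splitOnP_eq_single _ _ (by
            intro x hx
            simp only [beq_iff_eq]
            intro h
            exact hq (h ▸ hx))
        rw [pvScan_noquote l hq out, hsplit]
        simp [pvTailE]

-- ===== VERDICT (by name: the statement is the Claim_ definition above) =====
theorem escape_unescaped_quotes_py_spec : Claim_equal_escape_unescaped_quotes_py := by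
  intro s _
  unfold Spec_escape_unescaped_quotes_py escape_unescaped_quotes_py escape_unescaped_quotes_py_alt
  have hA := pvA_eq_scan s.toList s.toList 0 [] (by simp) (by omega)
  simp only [Nat.cast_zero] at hA
  have hS := pvScan_eq_split s.toList.length s.toList le_rfl []
  obtain ⟨q, rest, hqr⟩ := List.exists_cons_of_ne_nil (List.splitOnP_ne_nil (· == '"') s.toList)
  have hqr' : s.toList.splitOn '"' = q :: rest := by simpa [List.splitOn] using hqr
  rw [hA]
  have : (List.take 0 s.toList) = [] := rfl
  rw [this]
  have h0 : pvTb [] = 0 := rfl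
  rw [h0, hS]
  congr 1
  rw [hqr']
  simp only [List.headD_cons, List.drop_one, List.tail_cons]
  rw [pvFold_zip rest q [q]]
  simp
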